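-- pv_equiv track=rewrite | github.com/jeneesmith1/Udacity-Data-Structures | P0/Task3.py | searchBangaloreNumbers
-- ===== SOURCE A (Python) =====
-- def searchBangaloreNumbers(numbers):
--   # takes the sorted sending numbers so that can start search for Bangalore numbers
--   bangaloreNumber = '080'
--   sendingNumbers = []
--   for number in numbers:
--     sendingNumbers.append(number[0][0:3])
--
--   bangaloreNumberStartIndex = binarySearchStartIndex(sendingNumbers, 0, len(sendingNumbers)-1, bangaloreNumber)
--   bangaloreNumberEndIndex = binarySearchEndIndex(sendingNumbers, 0, len(sendingNumbers)-1, bangaloreNumber)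
--   return [bangaloreNumberStartIndex, bangaloreNumberEndIndex]
--
-- def binarySearchStartIndex(array, low, high, searchItem):
--   #gets the first index for the search term in the list passed into it
--   startIndex = -1
--   return binarySearchStartHelper(array, low, high, searchItem, startIndex)
--
-- def binarySearchStartHelper(array, low, high, searchItem, startIndex):
--   if low >= high:
--     return startIndex
--   else:
--     mid = (high - low) // 2 + low
--     if array[mid] > searchItem:
--       return binarySearchStartHelper(array, low, mid - 1, searchItem, startIndex)
--     elif array[mid] == searchItem:
--       startIndex = mid
--       high = mid - 1
--       return binarySearchStartHelper(array, low, mid - 1, searchItem, mid)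
--     else:
--       return binarySearchStartHelper(array, mid + 1, high, searchItem, mid)
--
-- def binarySearchEndIndex(array, low, high, searchItem):
--   #gets the last index for the search term in the list passed into it
--   endIndex = -1
--   return binarySearchEndHelper(array, low, high, searchItem, endIndex)
--
-- def binarySearchEndHelper(array, low, high, searchItem, endIndex):
--   if low >= high:
--     return endIndex
--   else:
--     mid = (high - low) // 2 + low
--     if array[mid] > searchItem:
--       return binarySearchEndHelper(array, low, mid - 1, searchItem, endIndex)
--     elif array[mid] == searchItem:
--       return binarySearchEndHelper(array, mid + 1, high, searchItem, mid)
--     else: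
--       return binarySearchEndHelper(array, mid + 1, high, searchItem, endIndex)
-- ===== SOURCE B (Python) =====
-- def searchBangaloreNumbers(numbers):
--   # Same search decisions as the original, but iterative and probing
--   # numbers[mid][0][:3] lazily instead of building the full prefix list first.
--   target = '080'
--   n = len(numbers)
--   start = -1
--   low, high = 0, n - 1
--   while low < high:
--     mid = (high - low) // 2 + low
--     p = numbers[mid][0][0:3]
--     if p > target:
--       high = mid - 1
--     elif p == target:
--       start = mid
--       high = mid - 1
--     else:
--       start = mid
--       low = mid + 1
--   end = -1
--   low, high = 0, n - 1
--   while low < high: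
--     mid = (high - low) // 2 + low
--     p = numbers[mid][0][0:3]
--     if p > target:
--       high = mid - 1
--     elif p == target:
--       end = mid
--       low = mid + 1
--     else:
--       low = mid + 1
--   return [start, end]
-- ===== Notes on version B (the rewrite author's own statement) =====
-- stated objective: alternative
-- what changed: B drops A's prefix-array build pass and its recursive helper functions: two iterative binary-search loops probe numbers[mid][0][:3] lazily, making the same comparisons and index updates as A.
import Mathlib
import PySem

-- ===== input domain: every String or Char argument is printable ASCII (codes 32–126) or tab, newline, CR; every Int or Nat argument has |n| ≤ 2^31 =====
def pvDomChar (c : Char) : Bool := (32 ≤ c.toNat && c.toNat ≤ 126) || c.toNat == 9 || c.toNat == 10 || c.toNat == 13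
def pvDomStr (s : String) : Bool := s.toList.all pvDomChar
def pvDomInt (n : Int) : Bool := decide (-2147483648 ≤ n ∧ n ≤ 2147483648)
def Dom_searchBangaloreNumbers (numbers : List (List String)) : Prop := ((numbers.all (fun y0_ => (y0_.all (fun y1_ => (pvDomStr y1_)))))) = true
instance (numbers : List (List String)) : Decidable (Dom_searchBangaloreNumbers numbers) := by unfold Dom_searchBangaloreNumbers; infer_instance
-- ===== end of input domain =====

-- B replaces A's recursive helpers and its full prefix-array build by two
-- iterative binary-search loops that slice the probed entry's prefix on demand,
-- making the same comparisons and index updates as A.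
-- (Both recursions are written with a Nat fuel bound ((high-low).toNat+1, a strict
-- bound on the shrinking span) purely to make them structural; the fuel is never
-- exhausted on the calls the entry functions make.)

-- Python string comparison a < b (lexicographic by code point), on List Char.
def pyStrLt : List Char → List Char → Bool
  | [], [] => false
  | [], _ :: _ => true
  | _ :: _, [] => false
  | a :: as, b :: bs => if a < b then true else if b < a then false else pyStrLt as bs

-- ===== PORT A =====
-- number[0][0:3] (number[0] raises IndexError on an empty inner list; Pre_ excludes
-- that, so the .getD defaults are unreachable under Pre_)
def pvPrefix3 (number : List String) : List Char :=
  PySem.List.slice ((PySem.List.pyGet? number 0).getD "").toList (some 0) (some 3)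

def binarySearchStartHelper (array : List (List Char)) (low high : Int) (searchItem : List Char) (startIndex : Int) : Nat → Int
  | 0 => startIndex
  | fuel + 1 =>
    if low ≥ high then startIndex
    else
      let mid := PySem.Int.floordiv (high - low) 2 + low
      let a := (PySem.List.pyGet? array mid).getD []
      if pyStrLt searchItem a then binarySearchStartHelper array low (mid - 1) searchItem startIndex fuel
      else if a = searchItem then binarySearchStartHelper array low (mid - 1) searchItem mid fuel
      else binarySearchStartHelper array (mid + 1) high searchItem mid fuel

def binarySearchStartIndex (array : List (List Char)) (low high : Int) (searchItem : List Char) : Int :=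
  binarySearchStartHelper array low high searchItem (-1) ((high - low).toNat + 1)

def binarySearchEndHelper (array : List (List Char)) (low high : Int) (searchItem : List Char) (endIndex : Int) : Nat → Int
  | 0 => endIndex
  | fuel + 1 =>
    if low ≥ high then endIndex
    else
      let mid := PySem.Int.floordiv (high - low) 2 + low
      let a := (PySem.List.pyGet? array mid).getD []
      if pyStrLt searchItem a then binarySearchEndHelper array low (mid - 1) searchItem endIndex fuel
      else if a = searchItem then binarySearchEndHelper array (mid + 1) high searchItem mid fuel
      else binarySearchEndHelper array (mid + 1) high searchItem endIndex fuel

def binarySearchEndIndex (array : List (List Char)) (low high : Int) (searchItem : List Char) : Int :=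
  binarySearchEndHelper array low high searchItem (-1) ((high - low).toNat + 1)

def searchBangaloreNumbers (numbers : List (List String)) : List Int :=
  let bangaloreNumber := "080".toList
  let sendingNumbers := numbers.foldl (fun acc number => acc ++ [pvPrefix3 number]) []
  let s := binarySearchStartIndex sendingNumbers 0 ((sendingNumbers.length : Int) - 1) bangaloreNumber
  let e := binarySearchEndIndex sendingNumbers 0 ((sendingNumbers.length : Int) - 1) bangaloreNumber
  [s, e]

-- ===== PORT B =====
-- numbers[mid][0][0:3], probed lazily
def altPrefix (numbers : List (List String)) (i : Int) : List Char :=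
  PySem.List.slice ((PySem.List.pyGet? ((PySem.List.pyGet? numbers i).getD []) 0).getD "").toList (some 0) (some 3)

def altLoopStart (numbers : List (List String)) (target : List Char) (low high res : Int) : Nat → Int
  | 0 => res
  | fuel + 1 =>
    if low < high then
      let mid := PySem.Int.floordiv (high - low) 2 + low
      let p := altPrefix numbers mid
      if pyStrLt target p then altLoopStart numbers target low (mid - 1) res fuel
      else if p = target then altLoopStart numbers target low (mid - 1) mid fuel
      else altLoopStart numbers target (mid + 1) high mid fuel
    else res

def altLoopEnd (numbers : List (List String)) (target : List Char) (low high res : Int) : Nat → Int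
  | 0 => res
  | fuel + 1 =>
    if low < high then
      let mid := PySem.Int.floordiv (high - low) 2 + low
      let p := altPrefix numbers mid
      if pyStrLt target p then altLoopEnd numbers target low (mid - 1) res fuel
      else if p = target then altLoopEnd numbers target (mid + 1) high mid fuel
      else altLoopEnd numbers target (mid + 1) high res fuel
    else res

def searchBangaloreNumbers_alt (numbers : List (List String)) : List Int :=
  let target := "080".toList
  let n := (numbers.length : Int)
  [altLoopStart numbers target 0 (n - 1) (-1) ((n - 1).toNat + 1),
   altLoopEnd numbers target 0 (n - 1) (-1) ((n - 1).toNat + 1)]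

-- ===== PRECONDITION & SPEC =====
-- Pre_ excludes inputs containing an empty inner list: there A's prefix-building loop
-- raises IndexError on number[0].
def Pre_searchBangaloreNumbers (numbers : List (List String)) : Prop :=
  ∀ number ∈ numbers, number ≠ []
instance (numbers : List (List String)) : Decidable (Pre_searchBangaloreNumbers numbers) := by unfold Pre_searchBangaloreNumbers; infer_instance

def pvWitness_searchBangaloreNumbers : List (List String) := [["0801111111"], ["0802222222"], ["1112223333"]]

def Spec_searchBangaloreNumbers (numbers : List (List String)) (out : List Int) : Prop := out = searchBangaloreNumbers_alt numbers
instance (numbers : List (List String)) (out : List Int) : Decidable (Spec_searchBangaloreNumbers numbers out) := by unfold Spec_searchBangaloreNumbers; infer_instance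

-- ===== CLAIM (what is proved, stated in full; the proofs are below) =====
def Claim_equal_searchBangaloreNumbers : Prop := ∀ (numbers : List (List String)), Dom_searchBangaloreNumbers numbers → Pre_searchBangaloreNumbers numbers → Spec_searchBangaloreNumbers numbers (searchBangaloreNumbers numbers)

-- ===== LEMMAS AND PROOFS =====

-- A's probed prefix (from the precomputed array) equals B's lazily computed prefix.
lemma pyGet?_map_prefix (numbers : List (List String)) (i : Int) :
    (PySem.List.pyGet? (numbers.map pvPrefix3) i).getD [] = altPrefix numbers i := by
  have h : PySem.List.pyGet? (numbers.map pvPrefix3) i = (PySem.List.pyGet? numbers i).map pvPrefix3 := by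
    simp [PySem.List.pyGet?, PySem.List.pyIdx?]
  rw [h, show altPrefix numbers i = pvPrefix3 ((PySem.List.pyGet? numbers i).getD []) from rfl]
  cases PySem.List.pyGet? numbers i with
  | none => simp [pvPrefix3, PySem.List.pyGet?, PySem.List.slice]
  | some x => rfl

lemma start_agree (numbers : List (List String)) (t : List Char) :
    ∀ fuel low high res, binarySearchStartHelper (numbers.map pvPrefix3) low high t res fuel
      = altLoopStart numbers t low high res fuel := by
  intro fuel
  induction fuel with
  | zero => intro low high res; rfl
  | succ fuel ih =>
    intro low high res
    rw [binarySearchStartHelper, altLoopStart]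
    by_cases h : low ≥ high
    · simp [h, show ¬ low < high by omega]
    · simp only [h, if_neg, show low < high by omega, if_pos, not_false_iff]
      rw [pyGet?_map_prefix]
      split_ifs <;> apply ih

lemma end_agree (numbers : List (List String)) (t : List Char) :
    ∀ fuel low high res, binarySearchEndHelper (numbers.map pvPrefix3) low high t res fuel
      = altLoopEnd numbers t low high res fuel := by
  intro fuel
  induction fuel with
  | zero => intro low high res; rfl
  | succ fuel ih =>
    intro low high res
    rw [binarySearchEndHelper, altLoopEnd]
    by_cases h : low ≥ high
    · simp [h, show ¬ low < high by omega]
    · simp only [h, if_neg, show low < high by omega, if_pos, not_false_iff]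
      rw [pyGet?_map_prefix]
      split_ifs <;> apply ih

-- ===== VERDICT (by name: the statement is the Claim_ definition above) =====
theorem searchBangaloreNumbers_spec : Claim_equal_searchBangaloreNumbers := by
  intro numbers _ _
  unfold Spec_searchBangaloreNumbers searchBangaloreNumbers searchBangaloreNumbers_alt
  simp only [PySem.List.foldl_append_singleton_eq_map, List.nil_append, List.length_map,
    binarySearchStartIndex, binarySearchEndIndex, sub_zero, start_agree, end_agree]
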